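-- pv_equiv track=rewrite | github.com/ahmetkucuk/flare-prediction | augmentation.py | shift_2d_list
-- ===== SOURCE A (Python) =====
-- from collections import deque
--
-- def shift_2d_list(list2d, rotate=1):
--
-- 	d1_len = len(list2d)
-- 	new_list2d = []
-- 	for i in range(d1_len):
-- 		data = list2d[i]
-- 		items = deque(data)
-- 		items.rotate(rotate)
-- 		new_list2d.append(list(items))
-- 	return new_list2d
-- ===== SOURCE B (Python) =====
-- def shift_2d_list(list2d, rotate=1):
-- 	# Build each output row element-by-element: output position j receives the
-- 	# source element at index (j - rotate) % n, instead of shuffling a deque.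
-- 	result = []
-- 	for row in list2d:
-- 		n = len(row)
-- 		result.append([row[(j - rotate) % n] for j in range(n)])
-- 	return result
-- ===== Notes on version B (the rewrite author's own statement) =====
-- stated objective: alternative
-- what changed: Each output row is constructed element-by-element by modular index arithmetic (position j takes row[(j - rotate) % n]) instead of materialising a deque and rotating it in place; empty rows fall out of the empty range with no special case.
import Mathlib
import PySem

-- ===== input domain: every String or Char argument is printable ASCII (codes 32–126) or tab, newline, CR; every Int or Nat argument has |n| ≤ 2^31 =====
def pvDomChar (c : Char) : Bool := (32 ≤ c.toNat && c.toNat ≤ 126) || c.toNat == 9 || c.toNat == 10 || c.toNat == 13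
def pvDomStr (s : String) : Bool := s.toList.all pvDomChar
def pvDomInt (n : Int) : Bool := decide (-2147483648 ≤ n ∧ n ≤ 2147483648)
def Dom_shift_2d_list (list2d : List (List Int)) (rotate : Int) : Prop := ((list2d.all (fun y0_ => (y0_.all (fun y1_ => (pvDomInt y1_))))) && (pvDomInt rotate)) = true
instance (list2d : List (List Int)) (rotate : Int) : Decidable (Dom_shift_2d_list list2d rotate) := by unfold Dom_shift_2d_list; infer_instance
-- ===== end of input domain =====

-- B builds each output row element-by-element by modular index arithmetic instead of rotating a deque; objective: alternative.


-- ===== PORT A =====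
-- exact semantics of deque(data).rotate(r): right rotation by (r mod len); no-op on an empty deque
-- (PySem has no deque, so this helper is a hand port; it is exact for any Int r, matching CPython's deque.rotate)
def pvDequeRotate (data : List Int) (r : Int) : List Int :=
  if data.length = 0 then data
  else
    let k := PySem.Int.mod r (data.length : Int)
    data.drop (data.length - k.toNat) ++ data.take (data.length - k.toNat)

def shift_2d_list (list2d : List (List Int)) (rotate : Int) : List (List Int) :=
  let d1_len := PySem.List.len list2d
  (PySem.List.pyRange 0 d1_len 1).foldl
    (fun new_list2d i => new_list2d ++ [pvDequeRotate (PySem.List.pyGetD list2d i []) rotate]) []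

-- ===== PORT B =====
-- row[(j - rotate) % n] is always in range (0 ≤ (j-rotate) mod n < n), so pyGetD is exact here
def shift_2d_list_alt (list2d : List (List Int)) (rotate : Int) : List (List Int) :=
  list2d.foldl
    (fun result row =>
      result ++ [(PySem.List.pyRange 0 (row.length : Int) 1).map
        (fun j => PySem.List.pyGetD row (PySem.Int.mod (j - rotate) (row.length : Int)) 0)]) []

-- ===== PRECONDITION & SPEC =====
def Spec_shift_2d_list (list2d : List (List Int)) (rotate : Int) (out : List (List Int)) : Prop := out = shift_2d_list_alt list2d rotate
instance (list2d : List (List Int)) (rotate : Int) (out : List (List Int)) : Decidable (Spec_shift_2d_list list2d rotate out) := by unfold Spec_shift_2d_list; infer_instance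

-- ===== CLAIM =====
def Claim_equal_shift_2d_list : Prop := ∀ (list2d : List (List Int)) (rotate : Int), Dom_shift_2d_list list2d rotate → Spec_shift_2d_list list2d rotate (shift_2d_list list2d rotate)

-- ===== LEMMAS AND PROOFS =====

-- per-row agreement: the deque rotation equals the modular-index reconstruction
theorem pvRow_eq (row : List Int) (r : Int) :
    pvDequeRotate row r =
      (PySem.List.pyRange 0 (row.length : Int) 1).map
        (fun j => PySem.List.pyGetD row (PySem.Int.mod (j - r) (row.length : Int)) 0) := by
  by_cases hn : row.length = 0
  · simp [pvDequeRotate, List.length_eq_zero_iff.mp hn, PySem.List.pyRange]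
  · have hpos : (0 : Int) < (row.length : Int) := by exact_mod_cast Nat.pos_of_ne_zero hn
    have hk0 : 0 ≤ PySem.Int.mod r (row.length : Int) := PySem.Int.mod_nonneg r hpos
    have hklt : PySem.Int.mod r (row.length : Int) < (row.length : Int) := PySem.Int.mod_lt r hpos
    set k := PySem.Int.mod r (row.length : Int) with hk
    rw [PySem.List.pyRange_one]
    simp only [Int.sub_zero, Int.toNat_natCast]
    apply List.ext_getElem
    · simp [pvDequeRotate, hn]
    · intro j h1 h2
      simp only [List.getElem_map, List.getElem_range, Int.zero_add]
      have hjlen : j < row.length := by simpa using h2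
      -- reduce the index:  (j - r) mod n = (j - k) mod n
      have hmod : PySem.Int.mod ((j : Int) - r) (row.length : Int)
          = if (j : Int) < k then (j : Int) - k + row.length else (j : Int) - k := by
        rw [PySem.Int.mod_eq_emod_of_pos hpos]
        have hr : r % (row.length : Int) = k := by
          rw [hk, PySem.Int.mod_eq_emod_of_pos hpos]
        have hj : (j : Int) % (row.length : Int) = j :=
          Int.emod_eq_of_lt (by omega) (by exact_mod_cast hjlen)
        have h3 : ((j : Int) - r) % (row.length : Int)
            = ((j : Int) - k) % (row.length : Int) := by
          conv_lhs => rw [Int.sub_emod, hr, hj]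
        rw [h3]
        split_ifs with hc
        · have h4 : ((j : Int) - k) % (row.length : Int)
              = ((j : Int) - k + row.length) % (row.length : Int) := by
            conv_rhs => rw [show (j : Int) - k + row.length
              = (j : Int) - k + (row.length : Int) * 1 by ring]
            rw [Int.add_mul_emod_self_left]
          rw [h4, Int.emod_eq_of_lt (by omega) (by omega)]
        · rw [Int.emod_eq_of_lt (by omega) (by omega)]
      rw [hmod]
      split_ifs with hc
      · rw [PySem.List.pyGetD_eq_getElem _ _ (by omega) (by omega)]
        have hidx : ((j : Int) - k + row.length).toNat = row.length - k.toNat + j := by omega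
        simp only [hidx]
        simp only [pvDequeRotate, if_neg hn, ← hk]
        rw [List.getElem_append_left (by simp; omega)]
        rw [List.getElem_drop]
      · rw [PySem.List.pyGetD_eq_getElem _ _ (by omega) (by omega)]
        have hidx : ((j : Int) - k).toNat = j - k.toNat := by omega
        simp only [hidx]
        simp only [pvDequeRotate, if_neg hn, ← hk]
        rw [List.getElem_append_right (by simp; omega)]
        simp only [List.length_drop]
        rw [List.getElem_take]
        congr 1
        omega

-- ===== VERDICT =====
theorem shift_2d_list_spec : Claim_equal_shift_2d_list := by
  intro list2d rotate _
  unfold Spec_shift_2d_list shift_2d_list shift_2d_list_alt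
  rw [PySem.List.foldl_pyRange_zero_pyGetD list2d []
    (fun acc data => acc ++ [pvDequeRotate data rotate]) []]
  rw [PySem.List.foldl_append_singleton_eq_map, PySem.List.foldl_append_singleton_eq_map]
  simp only [List.nil_append]
  exact List.map_congr_left (fun row _ => pvRow_eq row rotate)
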